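-- pv_equiv track=rewrite | github.com/imsepehr/IUT | Semester 8th/Algorithm/HW/HW4/Q2.py | calculate_min_discomfort
-- ===== SOURCE A (Python) =====
-- def calculate_min_discomfort(n, destinations):
--     results = []
--
--     for i in range(n):
--         dests = destinations[i*4:(i+1)*4]
--
--         min_discomfort = float('inf')
--
--         for j in range(4):
--             front_seat = dests[j]
--             back_seats = dests[:j] + dests[j+1:]
--
--             back_seats.sort()
--
--             discomfort = 0
--             for k in range(3):
--                 if k > 0 and back_seats[k] != back_seats[k-1]:
--                     discomfort += k
--
--             min_discomfort = min(min_discomfort, discomfort)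
--
--         results.append(min_discomfort)
--
--     return results
-- ===== SOURCE B (Python) =====
-- def calculate_min_discomfort(n, destinations):
--     results = []
--     for i in range(n):
--         g = destinations[i * 4:(i + 1) * 4]
--         eq_pairs = 0
--         for x in range(4):
--             for y in range(x + 1, 4):
--                 if g[x] == g[y]:
--                     eq_pairs += 1
--         if eq_pairs >= 3:
--             results.append(0)
--         elif eq_pairs == 2:
--             results.append(1)
--         elif eq_pairs == 1:
--             results.append(1 if g.count(min(g)) == 1 else 2)
--         else:
--             results.append(3)
--     return results
-- ===== Notes on version B (the rewrite author's own statement) =====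
-- stated objective: alternative
-- what changed: B never enumerates front-seat choices nor sorts: it counts the equal pairs among the 4 destinations (0,1,2,3 or 6) and reads the answer off a closed-form case table, using count(min) to separate the two outcomes of the one-pair pattern; A tries all 4 removals and scores each sorted triple.
import Mathlib
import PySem

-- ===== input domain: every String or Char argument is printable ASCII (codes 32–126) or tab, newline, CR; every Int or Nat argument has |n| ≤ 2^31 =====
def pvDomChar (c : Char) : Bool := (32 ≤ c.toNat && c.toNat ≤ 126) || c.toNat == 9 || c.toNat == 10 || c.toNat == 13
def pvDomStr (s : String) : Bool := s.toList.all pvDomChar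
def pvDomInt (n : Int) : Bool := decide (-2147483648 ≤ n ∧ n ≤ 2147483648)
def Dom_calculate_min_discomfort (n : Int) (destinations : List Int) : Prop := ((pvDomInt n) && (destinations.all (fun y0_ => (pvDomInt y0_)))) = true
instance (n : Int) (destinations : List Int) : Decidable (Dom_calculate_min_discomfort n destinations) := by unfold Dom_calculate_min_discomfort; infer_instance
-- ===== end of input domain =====

-- B replaces A's enumeration of the 4 front-seat choices (each with a sort of the remaining 3)
-- by a closed-form case analysis on the number of equal pairs in the group (objective: alternative).

-- ===== PORT A =====
-- back_seats = dests[:j] + dests[j+1:]; back_seats.sort()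
def pvBackA (dests : List Int) (j : Int) : List Int :=
  PySem.List.sorted (PySem.List.slice dests none (some j) ++ PySem.List.slice dests (some (j+1)) none) (fun v => v)

-- discomfort accumulation: for k in range(3): if k > 0 and bs[k] != bs[k-1]: discomfort += k
-- (bs[k] out of range raises IndexError in Python; excluded by Pre_, the port defaults)
def pvDiscA (bs : List Int) : Int :=
  (PySem.List.pyRange 0 3).foldl
    (fun d k => if 0 < k ∧ PySem.List.pyGetD bs k 0 ≠ PySem.List.pyGetD bs (k-1) 0 then d + k else d) 0

-- min_discomfort = min(min_discomfort, discomfort); Option Int models the float('inf') start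
def pvMinStep (m : Option Int) (disc : Int) : Option Int :=
  match m with
  | none => some disc
  | some v => some (min v disc)

def pvGroupA (dests : List Int) : Int :=
  ((PySem.List.pyRange 0 4).foldl (fun m j => pvMinStep m (pvDiscA (pvBackA dests j))) none).getD 0

def calculate_min_discomfort (n : Int) (destinations : List Int) : List Int :=
  (PySem.List.pyRange 0 n).foldl
    (fun results i =>
      results ++ [pvGroupA (PySem.List.slice destinations (some (i*4)) (some ((i+1)*4)))]) []

-- ===== PORT B =====
-- eq_pairs = 0; for x in range(4): for y in range(x+1, 4): if g[x] == g[y]: eq_pairs += 1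
-- (g[x] out of range raises IndexError in Python; excluded by Pre_, the port defaults)
def pvEqPairs (g : List Int) : Int :=
  (PySem.List.pyRange 0 4).foldl (fun e x =>
    (PySem.List.pyRange (x+1) 4).foldl (fun e y =>
      if PySem.List.pyGetD g x 0 = PySem.List.pyGetD g y 0 then e + 1 else e) e) 0

-- if eq_pairs >= 3: 0 elif == 2: 1 elif == 1: (1 if g.count(min(g)) == 1 else 2) else: 3
def pvGroupB (g : List Int) : Int :=
  let e := pvEqPairs g
  if 3 ≤ e then 0
  else if e = 2 then 1
  else if e = 1 then
    if PySem.List.count g ((PySem.List.min? g (fun v => v)).getD 0) = 1 then 1 else 2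
  else 3

def calculate_min_discomfort_alt (n : Int) (destinations : List Int) : List Int :=
  (PySem.List.pyRange 0 n).foldl
    (fun results i =>
      results ++ [pvGroupB (PySem.List.slice destinations (some (i*4)) (some ((i+1)*4)))]) []

-- ===== PRECONDITION & SPEC =====
-- Pre_ excludes exactly the inputs where Python A raises IndexError: a positive n with fewer
-- than 4*n destinations (dests[j] / back_seats[k] out of range on a short group).
def Pre_calculate_min_discomfort (n : Int) (destinations : List Int) : Prop :=
  n ≤ 0 ∨ 4 * n ≤ (destinations.length : Int)
instance (n : Int) (destinations : List Int) : Decidable (Pre_calculate_min_discomfort n destinations) := by unfold Pre_calculate_min_discomfort; infer_instance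

def pvWitness_calculate_min_discomfort : Int × List Int := (2, [3, 1, 3, 2, 5, 5, 5, 4])

def Spec_calculate_min_discomfort (n : Int) (destinations : List Int) (out : List Int) : Prop := out = calculate_min_discomfort_alt n destinations
instance (n : Int) (destinations : List Int) (out : List Int) : Decidable (Spec_calculate_min_discomfort n destinations out) := by unfold Spec_calculate_min_discomfort; infer_instance

-- ===== CLAIM (what is proved, stated in full; the proofs are below) =====
def Claim_equal_calculate_min_discomfort : Prop := ∀ (n : Int) (destinations : List Int), Dom_calculate_min_discomfort n destinations → Pre_calculate_min_discomfort n destinations → Spec_calculate_min_discomfort n destinations (calculate_min_discomfort n destinations)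

-- ===== LEMMAS AND PROOFS =====

-- A's per-candidate "sort the 3 back seats, then score adjacent differences", as a function of the triple
def pvD (x y z : Int) : Int := pvDiscA (PySem.List.sorted [x, y, z] (fun v => v))

-- A's k-loop on an explicit triple
lemma pv_discA_eval (p q r : Int) :
    pvDiscA [p, q, r] = (if q ≠ p then 1 else 0) + (if r ≠ q then 2 else 0) := by
  simp only [pvDiscA, show PySem.List.pyRange 0 3 = [0,1,2] from by decide, List.foldl]
  norm_num [pysem]
  simp only [show Int.toNat 2 = 2 from rfl, List.getElem_cons_succ, List.getElem_cons_zero]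
  split_ifs <;> omega

-- closed-form value of A's sort-then-score on an arbitrary triple
lemma pvD_eval (x y z : Int) :
    pvD x y z =
      if x = y ∧ y = z then 0
      else if x = y then (if z < x then 1 else 2)
      else if y = z then (if x < y then 1 else 2)
      else if x = z then (if y < x then 1 else 2)
      else 3 := by
  unfold pvD
  rcases le_total x y with h1 | h1
  · rcases le_total y z with h2 | h2
    · have hs : PySem.List.sorted [x, y, z] (fun v => v) = [x, y, z] :=
        PySem.List.sorted_id_eq_of_perm_of_pairwise _ _ (List.Perm.refl _)
          (by norm_num [List.pairwise_cons]; omega)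
      rw [hs, pv_discA_eval]; split_ifs <;> omega
    · rcases le_total x z with h3 | h3
      · have hs : PySem.List.sorted [x, y, z] (fun v => v) = [x, z, y] :=
          PySem.List.sorted_id_eq_of_perm_of_pairwise _ _ (List.Perm.cons x (List.Perm.swap y z []))
            (by norm_num [List.pairwise_cons]; omega)
        rw [hs, pv_discA_eval]; split_ifs <;> omega
      · have hs : PySem.List.sorted [x, y, z] (fun v => v) = [z, x, y] :=
          PySem.List.sorted_id_eq_of_perm_of_pairwise _ _
            ((List.Perm.swap x z [y]).trans (List.Perm.cons x (List.Perm.swap y z [])))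
            (by norm_num [List.pairwise_cons]; omega)
        rw [hs, pv_discA_eval]; split_ifs <;> omega
  · rcases le_total y z with h2 | h2
    · rcases le_total x z with h3 | h3
      · have hs : PySem.List.sorted [x, y, z] (fun v => v) = [y, x, z] :=
          PySem.List.sorted_id_eq_of_perm_of_pairwise _ _ (List.Perm.swap x y [z])
            (by norm_num [List.pairwise_cons]; omega)
        rw [hs, pv_discA_eval]; split_ifs <;> omega
      · have hs : PySem.List.sorted [x, y, z] (fun v => v) = [y, z, x] :=
          PySem.List.sorted_id_eq_of_perm_of_pairwise _ _
            ((List.Perm.cons y (List.Perm.swap x z [])).trans (List.Perm.swap x y [z]))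
            (by norm_num [List.pairwise_cons]; omega)
        rw [hs, pv_discA_eval]; split_ifs <;> omega
    · have hs : PySem.List.sorted [x, y, z] (fun v => v) = [z, y, x] :=
        PySem.List.sorted_id_eq_of_perm_of_pairwise _ _ (List.reverse_perm [x, y, z])
          (by norm_num [List.pairwise_cons]; omega)
      rw [hs, pv_discA_eval]; split_ifs <;> omega

-- xs[:j] + xs[j+1:] is eraseIdx
lemma pv_slice_erase (s : List Int) (j : Int) (hj : 0 ≤ j) :
    PySem.List.slice s none (some j) ++ PySem.List.slice s (some (j + 1)) none
      = s.eraseIdx j.toNat := by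
  rw [PySem.List.slice_to s hj, PySem.List.slice_from s (by omega)]
  have h2 : (j + 1).toNat = j.toNat + 1 := by omega
  rw [h2, ← List.eraseIdx_eq_take_drop_succ]

-- A's group value on an explicit group of four: the minimum of the four sort-then-score values
lemma pv_groupA_eval (a b c d : Int) :
    pvGroupA [a, b, c, d] = min (min (min (pvD b c d) (pvD a c d)) (pvD a b d)) (pvD a b c) := by
  have e0 : pvBackA [a,b,c,d] (0 : Int) = PySem.List.sorted [b,c,d] (fun v => v) := by
    unfold pvBackA; rw [pv_slice_erase _ _ (by norm_num)]; rfl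
  have e1 : pvBackA [a,b,c,d] (1 : Int) = PySem.List.sorted [a,c,d] (fun v => v) := by
    unfold pvBackA; rw [pv_slice_erase _ _ (by norm_num)]; rfl
  have e2 : pvBackA [a,b,c,d] (2 : Int) = PySem.List.sorted [a,b,d] (fun v => v) := by
    unfold pvBackA; rw [pv_slice_erase _ _ (by norm_num)]; rfl
  have e3 : pvBackA [a,b,c,d] (3 : Int) = PySem.List.sorted [a,b,c] (fun v => v) := by
    unfold pvBackA; rw [pv_slice_erase _ _ (by norm_num)]; rfl
  simp only [pvGroupA, show PySem.List.pyRange 0 4 = [0,1,2,3] from by decide, List.foldl,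
    e0, e1, e2, e3, pvMinStep, pvD, Option.getD_some]

-- B's pair count on an explicit group of four
lemma pv_eqPairs_eval (a b c d : Int) :
    pvEqPairs [a, b, c, d] =
      (if a = b then 1 else 0) + (if a = c then 1 else 0) + (if a = d then 1 else 0)
      + (if b = c then 1 else 0) + (if b = d then 1 else 0) + (if c = d then (1:Int) else 0) := by
  simp only [pvEqPairs,
    show PySem.List.pyRange 0 4 = [0,1,2,3] from by decide,
    show PySem.List.pyRange (0+1) 4 = [1,2,3] from by decide,
    show PySem.List.pyRange (1+1) 4 = [2,3] from by decide,
    show PySem.List.pyRange (2+1) 4 = [3] from by decide,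
    show PySem.List.pyRange (3+1) 4 = ([] : List Int) from by decide,
    List.foldl]
  norm_num [pysem]
  simp only [show Int.toNat 2 = 2 from rfl, show Int.toNat 3 = 3 from rfl,
    List.getElem_cons_succ, List.getElem_cons_zero]
  split_ifs <;> omega

-- B's min(g) on an explicit group of four
lemma pv_minval_eval (a b c d : Int) :
    (PySem.List.min? [a, b, c, d] (fun v => v)).getD 0 = min (min (min a b) c) d := by
  rw [PySem.List.min?_id_cons]
  simp [List.foldl]

-- B's g.count(m) on an explicit group of four
lemma pv_count_eval (a b c d m : Int) :
    PySem.List.count [a, b, c, d] m =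
      (if a = m then 1 else 0) + (if b = m then 1 else 0)
      + (if c = m then 1 else 0) + (if d = m then (1:Nat) else 0) := by
  simp only [PySem.List.count_eq, List.count_cons, List.count_nil, beq_iff_eq]
  split_ifs <;> omega

-- per-group equality on any full group of four destinations
set_option maxHeartbeats 1000000 in
lemma pv_group_eq (a b c d : Int) : pvGroupA [a, b, c, d] = pvGroupB [a, b, c, d] := by
  rw [pv_groupA_eval]
  simp only [pvD_eval, pvGroupB, pv_eqPairs_eval, pv_minval_eval, pv_count_eval]
  by_cases hab : a = b <;> by_cases hac : a = c <;> by_cases had : a = d <;>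
    by_cases hbc : b = c <;> by_cases hbd : b = d <;> by_cases hcd : c = d <;>
    simp_all <;> split_ifs <;> omega

-- ===== VERDICT (by name: the statement is the Claim_ definition above) =====
theorem calculate_min_discomfort_spec : Claim_equal_calculate_min_discomfort := by
  intro n destinations _ hpre
  unfold Spec_calculate_min_discomfort calculate_min_discomfort calculate_min_discomfort_alt
  rw [PySem.List.foldl_append_singleton_eq_map, PySem.List.foldl_append_singleton_eq_map]
  simp only [List.nil_append]
  apply List.map_congr_left
  intro i hi
  rw [PySem.List.mem_pyRange_one] at hi
  obtain ⟨hi0, hin⟩ := hi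
  have hlen : (i + 1) * 4 ≤ (destinations.length : Int) := by
    rcases hpre with h | h <;> omega
  have he4 : ((i * 4 : Int)) = ((i.toNat * 4 : Nat) : Int) := by omega
  have he5 : (((i + 1) * 4 : Int)) = ((i.toNat * 4 + 4 : Nat) : Int) := by omega
  rw [he4, he5, PySem.List.slice_natCast]
  have hl : ((destinations.drop (i.toNat * 4)).take (i.toNat * 4 + 4 - i.toNat * 4)).length = 4 := by
    rw [List.length_take, List.length_drop]
    omega
  generalize ((destinations.drop (i.toNat * 4)).take (i.toNat * 4 + 4 - i.toNat * 4)) = l at hl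
  match l, hl with
  | [a, b, c, d], _ => exact pv_group_eq a b c d
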